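-- pv_equiv track=rewrite | github.com/ash-project/ash_typescript | tmp_transform.py | count_commas_at_depth_0
-- ===== SOURCE A (Python) =====
-- def count_commas_at_depth_0(text):
--     """Count commas at depth 0 (direct args) in the given text."""
--     depth = 0
--     commas = 0
--     i = 0
--     while i < len(text):
--         c = text[i]
--         if c in '([{':
--             depth += 1
--         elif c in ')]}':
--             depth -= 1
--         elif c == ',' and depth == 0:
--             commas += 1
--         elif c == '"':
--             i += 1
--             while i < len(text) and text[i] != '"':
--                 if text[i] == '\\':
--                     i += 1
--                 i += 1
--         i += 1
--     return commas
-- ===== SOURCE B (Python) =====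
-- def count_commas_at_depth_0(text):
--     """Count commas at depth 0 (direct args) in the given text."""
--     depth = 0
--     commas = 0
--     in_string = False
--     escape = False
--     for c in text:
--         if escape:
--             escape = False
--         elif in_string:
--             if c == '\\':
--                 escape = True
--             elif c == '"':
--                 in_string = False
--         elif c in '([{':
--             depth += 1
--         elif c in ')]}':
--             depth -= 1
--         elif c == ',' and depth == 0:
--             commas += 1
--         elif c == '"':
--             in_string = True
--     return commas
-- ===== Notes on version B (the rewrite author's own statement) =====
-- stated objective: simpler
-- what changed: Replaced A's index-driven outer while-loop with a nested inner while that scans ahead over quoted strings by a single flat for-loop finite state machine over the characters carrying depth/in_string/escape flags.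
import Mathlib
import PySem

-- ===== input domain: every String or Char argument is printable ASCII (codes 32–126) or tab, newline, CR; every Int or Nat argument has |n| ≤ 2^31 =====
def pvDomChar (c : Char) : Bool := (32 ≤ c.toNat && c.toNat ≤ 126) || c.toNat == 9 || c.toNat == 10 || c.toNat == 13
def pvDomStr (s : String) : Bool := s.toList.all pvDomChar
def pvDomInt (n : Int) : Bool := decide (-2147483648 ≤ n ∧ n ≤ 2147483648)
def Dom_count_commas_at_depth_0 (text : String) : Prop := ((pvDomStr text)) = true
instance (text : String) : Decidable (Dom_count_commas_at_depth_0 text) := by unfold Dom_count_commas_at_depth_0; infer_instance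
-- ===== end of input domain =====

-- B replaces A's nested index loop (an inner while scanning ahead over quoted strings) by a single
-- flat finite-state-machine pass maintaining depth/in_string/escape; objective: simpler, same cost.

-- ===== PORT A =====
-- A's inner while loop: advance past the chars of a quoted string (a backslash consumes the
-- following char); returns the suffix after the closing quote (or [] if unterminated).
def pvSkipStr : List Char → List Char
  | [] => []
  | c :: rest =>
    if c = '"' then rest
    else if c = '\\' then pvSkipStr rest.tail
    else pvSkipStr rest
termination_by l => l.length
decreasing_by
  all_goals simp only [List.length_cons]
  · have := List.length_tail (l := rest); omega
  · omega

-- needed by pvLoopA's termination proof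
theorem pvSkipStr_length_le : ∀ l : List Char, (pvSkipStr l).length ≤ l.length
  | [] => by simp [pvSkipStr]
  | c :: rest => by
    unfold pvSkipStr
    split_ifs with h1 h2
    · simp
    · have h3 := pvSkipStr_length_le rest.tail
      have h4 := List.length_tail (l := rest)
      simp only [List.length_cons]; omega
    · have h3 := pvSkipStr_length_le rest
      simp only [List.length_cons]; omega
termination_by l => l.length
decreasing_by
  all_goals simp only [List.length_cons]
  · have := List.length_tail (l := rest); omega
  · omega

-- A's outer while loop over the remaining characters, carrying depth and the comma count.
def pvLoopA : List Char → Int → Int → Int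
  | [], _, commas => commas
  | c :: rest, depth, commas =>
    if c = '(' ∨ c = '[' ∨ c = '{' then pvLoopA rest (depth + 1) commas
    else if c = ')' ∨ c = ']' ∨ c = '}' then pvLoopA rest (depth - 1) commas
    else if c = ',' ∧ depth = 0 then pvLoopA rest depth (commas + 1)
    else if c = '"' then pvLoopA (pvSkipStr rest) depth commas
    else pvLoopA rest depth commas
termination_by l _ _ => l.length
decreasing_by
  all_goals simp only [List.length_cons]
  · omega
  · omega
  · omega
  · have := pvSkipStr_length_le rest; omega
  · omega

def count_commas_at_depth_0 (text : String) : Int := pvLoopA text.toList 0 0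

-- ===== PORT B =====
-- one FSM transition of B's for-loop: state = (depth, in_string, escape, commas)
def pvStep (s : Int × Bool × Bool × Int) (c : Char) : Int × Bool × Bool × Int :=
  let (depth, instr, esc, commas) := s
  if esc then (depth, instr, false, commas)
  else if instr then
    if c = '\\' then (depth, instr, true, commas)
    else if c = '"' then (depth, false, esc, commas)
    else (depth, instr, esc, commas)
  else if c = '(' ∨ c = '[' ∨ c = '{' then (depth + 1, instr, esc, commas)
  else if c = ')' ∨ c = ']' ∨ c = '}' then (depth - 1, instr, esc, commas)
  else if c = ',' ∧ depth = 0 then (depth, instr, esc, commas + 1)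
  else if c = '"' then (depth, true, esc, commas)
  else (depth, instr, esc, commas)

def count_commas_at_depth_0_alt (text : String) : Int :=
  (text.toList.foldl pvStep (0, false, false, 0)).2.2.2

-- ===== PRECONDITION & SPEC =====
def Spec_count_commas_at_depth_0 (text : String) (out : Int) : Prop := out = count_commas_at_depth_0_alt text
instance (text : String) (out : Int) : Decidable (Spec_count_commas_at_depth_0 text out) := by unfold Spec_count_commas_at_depth_0; infer_instance

-- ===== CLAIM (what is proved, stated in full; the proofs are below) =====
def Claim_equal_count_commas_at_depth_0 : Prop := ∀ (text : String), Dom_count_commas_at_depth_0 text → Spec_count_commas_at_depth_0 text (count_commas_at_depth_0 text)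

-- ===== LEMMAS AND PROOFS =====

-- folding B's FSM from the in-string state yields the same comma count as resuming the
-- normal-state fold after A's inner skip loop
theorem pv_skip_cnt : ∀ (n : Nat) (cs : List Char) (d cm : Int), cs.length ≤ n →
    (cs.foldl pvStep (d, true, false, cm)).2.2.2
      = ((pvSkipStr cs).foldl pvStep (d, false, false, cm)).2.2.2 := by
  intro n
  induction n with
  | zero =>
    intro cs d cm h
    have : cs = [] := List.eq_nil_of_length_eq_zero (Nat.le_zero.mp h)
    subst this; simp [pvSkipStr]
  | succ n ih =>
    intro cs d cm h
    match cs with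
    | [] => simp [pvSkipStr]
    | c :: rest =>
      by_cases hq : c = '"'
      · subst hq
        simp [pvSkipStr, pvStep]
      · by_cases hb : c = '\\'
        · subst hb
          simp only [pvSkipStr, List.foldl_cons, reduceIte]
          have hstep : pvStep (d, true, false, cm) '\\' = (d, true, true, cm) := by
            simp [pvStep]
          rw [hstep]
          match rest with
          | [] => simp [pvSkipStr]
          | c' :: rest' =>
            have hstep2 : pvStep (d, true, true, cm) c' = (d, true, false, cm) := by
              simp [pvStep]
            simp only [List.foldl_cons, List.tail_cons, hstep2]
            exact ih rest' d cm (by simp at h ⊢; omega)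
        · simp only [pvSkipStr, List.foldl_cons]
          rw [if_neg hq, if_neg hb]
          have hstep : pvStep (d, true, false, cm) c = (d, true, false, cm) := by
            simp [pvStep, hq, hb]
          rw [hstep]
          exact ih rest d cm (by simp at h; omega)

-- A's outer loop equals B's FSM fold started in the normal state
theorem pv_loop_eq : ∀ (n : Nat) (cs : List Char) (d cm : Int), cs.length ≤ n →
    pvLoopA cs d cm = (cs.foldl pvStep (d, false, false, cm)).2.2.2 := by
  intro n
  induction n with
  | zero =>
    intro cs d cm h
    have : cs = [] := List.eq_nil_of_length_eq_zero (Nat.le_zero.mp h)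
    subst this; simp [pvLoopA]
  | succ n ih =>
    intro cs d cm h
    match cs with
    | [] => simp [pvLoopA]
    | c :: rest =>
      have hlen : rest.length ≤ n := by simp at h; omega
      unfold pvLoopA
      split_ifs with h1 h2 h3 h4
      · have hstep : pvStep (d, false, false, cm) c = (d + 1, false, false, cm) := by
          simp [pvStep, h1]
        simp only [List.foldl_cons, hstep]
        exact ih rest (d + 1) cm hlen
      · have hstep : pvStep (d, false, false, cm) c = (d - 1, false, false, cm) := by
          simp [pvStep, h1, h2]
        simp only [List.foldl_cons, hstep]
        exact ih rest (d - 1) cm hlen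
      · have hstep : pvStep (d, false, false, cm) c = (d, false, false, cm + 1) := by
          simp [pvStep, h3.1, h3.2]
        simp only [List.foldl_cons, hstep]
        exact ih rest d (cm + 1) hlen
      · have hstep : pvStep (d, false, false, cm) c = (d, true, false, cm) := by
          simp [pvStep, h4]
        simp only [List.foldl_cons, hstep]
        have hle := pvSkipStr_length_le rest
        rw [ih (pvSkipStr rest) d cm (by omega)]
        exact (pv_skip_cnt n rest d cm hlen).symm
      · have hstep : pvStep (d, false, false, cm) c = (d, false, false, cm) := by
          simp [pvStep, h1, h2, h3, h4]
        simp only [List.foldl_cons, hstep]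
        exact ih rest d cm hlen

-- ===== VERDICT (by name: the statement is the Claim_ definition above) =====
theorem count_commas_at_depth_0_spec : Claim_equal_count_commas_at_depth_0 := by
  intro text _
  unfold Spec_count_commas_at_depth_0 count_commas_at_depth_0 count_commas_at_depth_0_alt
  exact pv_loop_eq text.toList.length text.toList 0 0 le_rfl
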